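-- pv_equiv track=rewrite | github.com/0xStryK3R/Scaler-DSA-Revision | python/Day-63/HW_2.py | solve
-- ===== SOURCE A (Python) =====
-- class TrieNode:
--     def __init__(self):
--         self.is_end = False
--         self.child = {}
--         self.freq = 0
--
-- def insert(trie, s):
--     p = trie
--     for ch in s:
--         p.freq += 1
--         if not p.child.get(ch, False):
--             p.child[ch] = TrieNode()
--         p = p.child[ch]
--     p.freq += 1
--     p.is_end = True
--
-- def get_freq(trie, s):
--     min_freq = trie.freq
--     for ch in s:
--         if ch in trie.child:
--             trie = trie.child[ch]
--             min_freq = min(min_freq, trie.freq)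
--         else:
--             min_freq = 0
--
--     return min_freq
--
-- def solve(A, B):
--     trie = TrieNode()
--     output = []
--
--     for op, word in zip(A, B):
--         if op:
--             output.append(get_freq(trie, word))
--         else:
--             insert(trie, word)
--
--
--     return output
-- ===== SOURCE B (Python) =====
-- def solve(A, B):
--     # No trie: keep the list of inserted words; a query counts the inserted
--     # words that start with the queried string (= min prefix frequency).
--     words = []
--     output = []
--     for op, word in zip(A, B):
--         if op:
--             output.append(sum(1 for w in words if w.startswith(word)))
--         else:
--             words.append(word)
--     return output
-- ===== Notes on version B (the rewrite author's own statement) =====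
-- stated objective: simpler
-- what changed: Drops the TrieNode/insert/get_freq machinery entirely: a query is answered by one scan counting stored words with the queried prefix (the trie's min-along-path equals the count of inserted words extending the full query).
import Mathlib
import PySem

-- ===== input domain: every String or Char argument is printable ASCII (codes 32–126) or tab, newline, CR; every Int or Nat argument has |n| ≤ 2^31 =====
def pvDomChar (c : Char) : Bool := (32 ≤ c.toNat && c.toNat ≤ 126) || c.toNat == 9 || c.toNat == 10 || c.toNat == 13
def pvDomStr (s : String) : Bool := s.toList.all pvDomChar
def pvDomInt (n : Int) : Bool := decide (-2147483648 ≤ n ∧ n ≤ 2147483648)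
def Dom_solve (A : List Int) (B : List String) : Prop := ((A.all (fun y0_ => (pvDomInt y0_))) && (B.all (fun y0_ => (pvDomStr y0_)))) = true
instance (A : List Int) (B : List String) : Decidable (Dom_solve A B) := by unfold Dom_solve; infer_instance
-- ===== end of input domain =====

-- B replaces the trie with a plain list of inserted words and answers a query by
-- counting stored words that start with the queried string (objective: simpler).

-- ===== PORT A =====
-- TrieNode: is_end / child dict / freq.  The child dict (Char keys, unique) is an
-- explicit child list (association list, insertion order, first match) because a
-- nested 'List (Char × TrieNode)' inductive is not allowed.
mutual
inductive TrieNode : Type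
  | mk : Bool → ChildList → Int → TrieNode
inductive ChildList : Type
  | nil : ChildList
  | cons : Char → TrieNode → ChildList → ChildList
end

def trieFreq : TrieNode → Int
  | .mk _ _ f => f

def trieChild : TrieNode → ChildList
  | .mk _ c _ => c

-- p.child.get(ch, False) key test / p.child[ch] lookup (assoc-list, first match)
def childGet? : ChildList → Char → Option TrieNode
  | .nil, _ => none
  | .cons c t rest, k => if c = k then some t else childGet? rest k

-- p.child[ch] = v (overwrite in place, else append — dict insertion semantics)
def childSet : ChildList → Char → TrieNode → ChildList
  | .nil, k, v => .cons k v .nil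
  | .cons c t rest, k, v => if c = k then .cons c v rest else .cons c t (childSet rest k v)

def emptyTrie : TrieNode := .mk false .nil 0

-- insert(trie, s): walk down s, bumping freq and creating missing children;
-- Python's in-place mutation becomes rebuilding the node on the way back up.
def insertT : TrieNode → List Char → TrieNode
  | .mk _ ch f, [] => .mk true ch (f + 1)
  | .mk e ch f, c :: cs =>
    let ch' := match childGet? ch c with
      | some _ => ch
      | none => childSet ch c emptyTrie
    let u := (childGet? ch' c).getD emptyTrie
    .mk e (childSet ch' c (insertT u cs)) (f + 1)

-- get_freq's loop: state = (current node, min_freq); on a missing child the node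
-- stays put and min_freq becomes 0, exactly as in the Python.
def getFreqLoop : TrieNode → Int → List Char → Int
  | _, mf, [] => mf
  | t, mf, c :: cs =>
    match childGet? (trieChild t) c with
    | some u => getFreqLoop u (min mf (trieFreq u)) cs
    | none => getFreqLoop t 0 cs

def get_freq (t : TrieNode) (s : List Char) : Int := getFreqLoop t (trieFreq t) s

def solveLoop : List (Int × String) → TrieNode → List Int → List Int
  | [], _, out => out
  | (op, w) :: rest, t, out =>
    if op ≠ 0 then solveLoop rest t (out ++ [get_freq t w.toList])
    else solveLoop rest (insertT t w.toList) out

def solve (A : List Int) (B : List String) : List Int :=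
  solveLoop (A.zip B) emptyTrie []

-- ===== PORT B =====
-- sum(1 for w in words if w.startswith(word))
def countPrefix (words : List String) (s : String) : Int :=
  words.foldl (fun acc w => if PySem.Str.startswith w s then acc + 1 else acc) 0

def solveAltLoop : List (Int × String) → List String → List Int → List Int
  | [], _, out => out
  | (op, w) :: rest, words, out =>
    if op ≠ 0 then solveAltLoop rest words (out ++ [countPrefix words w])
    else solveAltLoop rest (words ++ [w]) out

def solve_alt (A : List Int) (B : List String) : List Int :=
  solveAltLoop (A.zip B) [] []

-- ===== PRECONDITION & SPEC =====
def Spec_solve (A : List Int) (B : List String) (out : List Int) : Prop := out = solve_alt A B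
instance (A : List Int) (B : List String) (out : List Int) : Decidable (Spec_solve A B out) := by unfold Spec_solve; infer_instance

-- ===== CLAIM (what is proved, stated in full; the proofs are below) =====
def Claim_equal_solve : Prop := ∀ (A : List Int) (B : List String), Dom_solve A B → Spec_solve A B (solve A B)

-- ===== LEMMAS AND PROOFS =====

-- number of words in ws having p as a prefix
def cnt (ws : List (List Char)) (p : List Char) : Int :=
  ((ws.countP (fun w => p.isPrefixOf w) : Nat) : Int)

def cntS (ws : List String) (p : List Char) : Int := cnt (ws.map String.toList) p

-- The trie/model invariant: node t faithfully represents the prefix-count model m.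
inductive TrieInv : TrieNode → (List Char → Int) → Prop
  | mk (e : Bool) (ch : ChildList) (f : Int) (m : List Char → Int)
      (hf : f = m [])
      (hsome : ∀ c u, childGet? ch c = some u → TrieInv u (fun s => m (c :: s)))
      (hnone : ∀ c, childGet? ch c = none → ∀ s, m (c :: s) = 0) :
      TrieInv (.mk e ch f) m

theorem trieInv_freq {t : TrieNode} {m : List Char → Int} (h : TrieInv t m) : trieFreq t = m [] := by
  cases h with | mk e ch f m hf _ _ => simpa [trieFreq] using hf

theorem trieInv_some {t : TrieNode} {m : List Char → Int} (h : TrieInv t m) {c : Char} {u : TrieNode}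
    (hc : childGet? (trieChild t) c = some u) : TrieInv u (fun s => m (c :: s)) := by
  cases h with | mk e ch f m hf hs hn => exact hs c u (by simpa [trieChild] using hc)

theorem trieInv_none {t : TrieNode} {m : List Char → Int} (h : TrieInv t m) {c : Char}
    (hc : childGet? (trieChild t) c = none) (s : List Char) : m (c :: s) = 0 := by
  cases h with | mk e ch f m hf hs hn => exact hn c (by simpa [trieChild] using hc) s

theorem trieInv_empty {m : List Char → Int} (h : ∀ s, m s = 0) : TrieInv emptyTrie m := by
  refine TrieInv.mk false .nil 0 m (by simp [h]) ?_ ?_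
  · intro c u hu; simp [childGet?] at hu
  · intro c _ s; exact h (c :: s)

theorem childGet?_childSet_self : ∀ (ch : ChildList) (k : Char) (v : TrieNode),
    childGet? (childSet ch k v) k = some v
  | .nil, k, v => by simp [childSet, childGet?]
  | .cons c t rest, k, v => by
    by_cases h : c = k
    · simp [childSet, h, childGet?]
    · simp [childSet, h, childGet?, childGet?_childSet_self rest k v]

theorem childGet?_childSet_ne : ∀ (ch : ChildList) (k k' : Char) (v : TrieNode), k' ≠ k →
    childGet? (childSet ch k v) k' = childGet? ch k'
  | .nil, k, k', v, h => by simp [childSet, childGet?, Ne.symm h]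
  | .cons c t rest, k, k', v, h => by
    by_cases hc : c = k
    · subst hc; simp [childSet, childGet?, Ne.symm h]
    · by_cases hc' : c = k'
      · subst hc'; simp [childSet, childGet?, hc]
      · simp [childSet, hc, childGet?, hc', childGet?_childSet_ne rest k k' v h]

-- once min_freq is 0 (node possibly stale), the loop returns 0: all freqs are ≥ 0
theorem getFreqLoop_zero (s : List Char) :
    ∀ (t : TrieNode) (m : List Char → Int), TrieInv t m → (∀ x, 0 ≤ m x) →
      getFreqLoop t 0 s = 0 := by
  induction s with
  | nil => intro t m _ _; simp [getFreqLoop]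
  | cons c cs ih =>
    intro t m h hpos
    cases hg : childGet? (trieChild t) c with
    | some u =>
      have hu := trieInv_some h hg
      have : min (0 : Int) (trieFreq u) = 0 := by
        have := trieInv_freq hu
        have : (0 : Int) ≤ trieFreq u := by rw [this]; exact hpos _
        omega
      simp only [getFreqLoop, hg, this]
      exact ih u _ hu (fun x => hpos (c :: x))
    | none =>
      simp only [getFreqLoop, hg]
      exact ih t m h hpos

theorem getFreqLoop_main (s : List Char) :
    ∀ (t : TrieNode) (m : List Char → Int), TrieInv t m → (∀ x, 0 ≤ m x) →
      (∀ p q, m (p ++ q) ≤ m p) →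
      getFreqLoop t (m []) s = m s := by
  induction s with
  | nil => intro t m _ _ _; simp [getFreqLoop]
  | cons c cs ih =>
    intro t m h hpos hdec
    cases hg : childGet? (trieChild t) c with
    | some u =>
      have hu := trieInv_some h hg
      have hfu : trieFreq u = m [c] := trieInv_freq hu
      have hle : m [c] ≤ m [] := by simpa using hdec [] [c]
      have hmin : min (m []) (trieFreq u) = m [c] := by rw [hfu]; omega
      simp only [getFreqLoop, hg, hmin]
      exact ih u (fun x => m (c :: x)) hu (fun x => hpos _) (fun p q => hdec (c :: p) q)
    | none =>
      simp only [getFreqLoop, hg]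
      rw [trieInv_none h hg cs]
      exact getFreqLoop_zero cs t m h hpos

-- model bump performed by inserting w
def bump (m : List Char → Int) (w : List Char) : List Char → Int :=
  fun p => m p + (if p.isPrefixOf w then 1 else 0)

theorem trieInv_insert (w : List Char) :
    ∀ (t : TrieNode) (m : List Char → Int), TrieInv t m → TrieInv (insertT t w) (bump m w) := by
  induction w with
  | nil =>
    intro t m h
    cases h with
    | mk e ch f m hf hs hn =>
      refine TrieInv.mk true ch (f + 1) _ (by simp [bump, List.isPrefixOf, hf]) ?_ ?_
      · intro c u hu
        have : (fun s => bump m [] (c :: s)) = (fun s => m (c :: s)) := by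
          funext s; simp [bump, List.isPrefixOf]
        exact this ▸ hs c u hu
      · intro c hc s
        simp [bump, List.isPrefixOf, hn c hc s]
  | cons c cs ih =>
    intro t m h
    cases h with
    | mk e ch f m hf hs hn =>
      cases hg : childGet? ch c with
      | some u =>
        have hrec : TrieInv (insertT u cs) (bump (fun s => m (c :: s)) cs) := ih u _ (hs c u hg)
        simp only [insertT]
        simp only [hg, Option.getD_some]
        refine TrieInv.mk e _ (f + 1) _ (by simp [bump, List.isPrefixOf, hf]) ?_ ?_
        · intro c' u' hu'
          by_cases hcc : c' = c
          · subst hcc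
            rw [childGet?_childSet_self] at hu'
            cases hu'
            have : (fun s => bump m (c' :: cs) (c' :: s)) = bump (fun s => m (c' :: s)) cs := by
              funext s; simp [bump, List.isPrefixOf]
            rw [this]; exact hrec
          · rw [childGet?_childSet_ne _ _ _ _ hcc] at hu'
            have : (fun s => bump m (c :: cs) (c' :: s)) = (fun s => m (c' :: s)) := by
              funext s; simp [bump, List.isPrefixOf, hcc]
            rw [this]; exact hs c' u' hu'
        · intro c' hc' s
          by_cases hcc : c' = c
          · subst hcc; rw [childGet?_childSet_self] at hc'; cases hc'
          · rw [childGet?_childSet_ne _ _ _ _ hcc] at hc'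
            simp [bump, List.isPrefixOf, hcc, hn c' hc' s]
      | none =>
        have hres : ∀ s, m (c :: s) = 0 := hn c hg
        have hrec : TrieInv (insertT emptyTrie cs) (bump (fun s => m (c :: s)) cs) :=
          ih emptyTrie _ (trieInv_empty hres)
        simp only [insertT]
        simp only [hg, childGet?_childSet_self, Option.getD_some]
        refine TrieInv.mk e _ (f + 1) _ (by simp [bump, List.isPrefixOf, hf]) ?_ ?_
        · intro c' u' hu'
          by_cases hcc : c' = c
          · subst hcc
            rw [childGet?_childSet_self] at hu'
            cases hu'
            have : (fun s => bump m (c' :: cs) (c' :: s)) = bump (fun s => m (c' :: s)) cs := by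
              funext s; simp [bump, List.isPrefixOf]
            rw [this]; exact hrec
          · rw [childGet?_childSet_ne _ _ _ _ hcc,
                childGet?_childSet_ne _ _ _ _ hcc] at hu'
            have : (fun s => bump m (c :: cs) (c' :: s)) = (fun s => m (c' :: s)) := by
              funext s; simp [bump, List.isPrefixOf, hcc]
            rw [this]; exact hs c' u' hu'
        · intro c' hc' s
          by_cases hcc : c' = c
          · subst hcc; rw [childGet?_childSet_self] at hc'; cases hc'
          · rw [childGet?_childSet_ne _ _ _ _ hcc,
                childGet?_childSet_ne _ _ _ _ hcc] at hc'
            simp [bump, List.isPrefixOf, hcc, hn c' hc' s]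

theorem cnt_nonneg (ws : List (List Char)) (p : List Char) : 0 ≤ cnt ws p := by
  simp [cnt]

theorem cnt_dec (ws : List (List Char)) (p q : List Char) : cnt ws (p ++ q) ≤ cnt ws p := by
  unfold cnt
  have : ws.countP (fun w => (p ++ q).isPrefixOf w) ≤ ws.countP (fun w => p.isPrefixOf w) := by
    apply List.countP_mono_left
    intro w _ hw
    have h1 : p ++ q <+: w := by simpa [List.isPrefixOf_iff_prefix] using hw
    simpa [List.isPrefixOf_iff_prefix] using (List.prefix_append p q).trans h1
  exact_mod_cast this

theorem cnt_append_singleton (ws : List (List Char)) (w : List Char) :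
    cnt (ws ++ [w]) = bump (cnt ws) w := by
  funext p
  simp only [cnt, bump, List.countP_append, List.countP_cons, List.countP_nil]
  by_cases h : p.isPrefixOf w <;> simp [h] <;> push_cast <;> try ring

theorem startswith_eq_isPrefixOf (a b : String) :
    PySem.Str.startswith a b = b.toList.isPrefixOf a.toList := by
  rw [Bool.eq_iff_iff]
  simp [PySem.Chars.startswith_iff, List.isPrefixOf_iff_prefix]

theorem foldl_countPrefix (ws : List String) (s : String) :
    ∀ acc : Int,
      ws.foldl (fun acc w => if PySem.Str.startswith w s then acc + 1 else acc) acc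
        = acc + cntS ws s.toList := by
  induction ws with
  | nil => intro acc; simp [cntS, cnt]
  | cons w rest ih =>
    intro acc
    rw [List.foldl_cons, ih, startswith_eq_isPrefixOf]
    simp only [cntS, cnt, List.map_cons, List.countP_cons]
    by_cases h : s.toList.isPrefixOf w.toList <;> simp [h] <;> push_cast <;> try ring

theorem countPrefix_eq (ws : List String) (s : String) :
    countPrefix ws s = cntS ws s.toList := by
  simpa using foldl_countPrefix ws s 0

theorem loop_eq (ops : List (Int × String)) :
    ∀ (t : TrieNode) (ws : List String) (out : List Int),
      TrieInv t (cntS ws) → solveLoop ops t out = solveAltLoop ops ws out := by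
  induction ops with
  | nil => intro t ws out _; rfl
  | cons p rest ih =>
    intro t ws out h
    obtain ⟨op, w⟩ := p
    by_cases hop : op ≠ 0
    · rw [solveLoop, solveAltLoop, if_pos hop, if_pos hop]
      have hget : get_freq t w.toList = cntS ws w.toList := by
        have := getFreqLoop_main w.toList t (cntS ws) h
          (fun x => cnt_nonneg _ x) (fun pp qq => cnt_dec _ pp qq)
        rw [get_freq, trieInv_freq h, this]
      rw [hget, countPrefix_eq]
      exact ih t ws _ h
    · rw [solveLoop, solveAltLoop, if_neg hop, if_neg hop]
      apply ih
      have : cntS (ws ++ [w]) = bump (cntS ws) w.toList := by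
        show cnt ((ws ++ [w]).map String.toList) = _
        rw [List.map_append]
        exact cnt_append_singleton _ _
      rw [this]
      exact trieInv_insert _ t _ h

-- ===== VERDICT (by name: the statement is the Claim_ definition above) =====
theorem solve_spec : Claim_equal_solve := by
  intro A B _
  unfold Spec_solve solve solve_alt
  apply loop_eq
  apply trieInv_empty
  intro s; simp [cntS, cnt]
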